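-- pv_equiv track=rewrite | github.com/ghsaboias/flashcards | lib/set_manager.py | display_set_name
-- ===== SOURCE A (Python) =====
-- def display_set_name(set_name):
--     """Format set name for display"""
--     if "Recognition_Practice/HSK_Level_1/" in set_name:
--         name = set_name.replace("Recognition_Practice/HSK_Level_1/", "").replace("_flashcards", "").replace("_", " ")
--         return "HSK 1: " + " ".join(word.capitalize() for word in name.split())
--     elif "Recognition_Practice/HSK_Level_2/" in set_name:
--         name = set_name.replace("Recognition_Practice/HSK_Level_2/", "").replace("_flashcards", "").replace("_", " ")
--         return "HSK 2: " + " ".join(word.capitalize() for word in name.split())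
--     else:
--         # Handle legacy or simple set names
--         clean_name = set_name.replace("_flashcards", "").replace("_", " ")
--         return " ".join(word.capitalize() for word in clean_name.split())
-- ===== SOURCE B (Python) =====
-- def display_set_name(set_name):
--     """Format set name for display.
--
--     Instead of A's staged replace/split/capitalize/join pipeline, the name is
--     formatted by ONE character scan: a little state machine walks the string
--     once, treats underscores and whitespace alike as word separators, and
--     emits each word directly (first char uppercased, the rest lowercased),
--     inserting a single space between emitted words.
--     """
--     label = ""
--     for lvl in "12":
--         pre = "Recognition_Practice/HSK_Level_" + lvl + "/"
--         if pre in set_name: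
--             label = "HSK " + lvl + ": "
--             set_name = set_name.replace(pre, "")
--             break
--     s = set_name.replace("_flashcards", "")
--     out = []
--     i, n = 0, len(s)
--     while i < n:
--         c = s[i]
--         if c == "_" or c.isspace():
--             i += 1
--         else:
--             word = [c.upper()]
--             i += 1
--             while i < n and s[i] != "_" and not s[i].isspace():
--                 word.append(s[i].lower())
--                 i += 1
--             if out:
--                 out.append(" ")
--             out.extend(word)
--     return label + "".join(out)
-- ===== Notes on version B (the rewrite author's own statement) =====
-- stated objective: alternative
-- what changed: Replaces A's staged replace/split/capitalize/join formatting pipeline by a single character-scan state machine that treats underscores and whitespace alike as word separators and emits each capitalized word directly, and folds the duplicated if/elif prefix branches into one first-match loop over the levels.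
import Mathlib
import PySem

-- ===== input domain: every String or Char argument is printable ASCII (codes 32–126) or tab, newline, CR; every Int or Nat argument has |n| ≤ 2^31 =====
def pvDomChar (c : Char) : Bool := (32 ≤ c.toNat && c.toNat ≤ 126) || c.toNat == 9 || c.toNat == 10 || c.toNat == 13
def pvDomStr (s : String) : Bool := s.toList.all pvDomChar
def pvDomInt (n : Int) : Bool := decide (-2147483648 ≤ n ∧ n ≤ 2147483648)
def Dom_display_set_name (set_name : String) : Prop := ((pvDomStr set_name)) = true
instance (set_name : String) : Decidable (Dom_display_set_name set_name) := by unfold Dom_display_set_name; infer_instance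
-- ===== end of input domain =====

-- B replaces A's staged replace/split/capitalize/join formatting pipeline by a single
-- character-scan state machine ('_' and whitespace are separators, words are emitted already
-- capitalized), and folds the duplicated if/elif prefix branches into one first-match loop.

-- ===== PORT A =====
-- str.capitalize(): first char uppercased, the rest lowercased; exact on the ASCII domain.
def pvCapL : List Char → List Char
  | [] => []
  | c :: r => c.toUpper :: r.map Char.toLower

def pyCapitalize (s : String) : String := String.ofList (pvCapL s.toList)

def display_set_name (set_name : String) : String :=
  if PySem.Str.isIn "Recognition_Practice/HSK_Level_1/" set_name then
    let name := PySem.Str.replace (PySem.Str.replace (PySem.Str.replace set_name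
      "Recognition_Practice/HSK_Level_1/" "") "_flashcards" "") "_" " "
    "HSK 1: " ++ PySem.Str.join " " ((PySem.Str.split₀ name).map pyCapitalize)
  else if PySem.Str.isIn "Recognition_Practice/HSK_Level_2/" set_name then
    let name := PySem.Str.replace (PySem.Str.replace (PySem.Str.replace set_name
      "Recognition_Practice/HSK_Level_2/" "") "_flashcards" "") "_" " "
    "HSK 2: " ++ PySem.Str.join " " ((PySem.Str.split₀ name).map pyCapitalize)
  else
    let clean_name := PySem.Str.replace (PySem.Str.replace set_name "_flashcards" "") "_" " "
    PySem.Str.join " " ((PySem.Str.split₀ clean_name).map pyCapitalize)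

-- ===== PORT B =====
-- c == "_" or c.isspace(): the scan's word-separator test
def pvIsSep (c : Char) : Bool := c == '_' || PySem.Chars.isspace c

-- inner while loop of Source B: extend the current word with lowered chars, return (word, rest)
def pvWordGo : List Char → List Char → List Char × List Char
  | [], w => (w, [])
  | c :: t, w => if pvIsSep c then (w, c :: t) else pvWordGo t (w ++ [c.toLower])

-- termination measure for the outer scan (cited by pvFmtGo's decreasing_by)
theorem pvWordGo_snd_length (t w : List Char) : (pvWordGo t w).2.length ≤ t.length := by
  induction t generalizing w with
  | nil => simp [pvWordGo]
  | cons c r ih =>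
    by_cases h : pvIsSep c = true <;> simp [pvWordGo, h]
    exact Nat.le_succ_of_le (ih _)

-- outer while loop of Source B: one pass, emitting capitalized words into the accumulator
def pvFmtGo : List Char → List Char → List Char
  | [], out => out
  | c :: t, out =>
    if pvIsSep c then pvFmtGo t out
    else
      let p := pvWordGo t [c.toUpper]
      pvFmtGo p.2 (if out.isEmpty then p.1 else out ++ ' ' :: p.1)
termination_by cs _ => cs.length
decreasing_by
  · simp
  · exact Nat.lt_succ_of_le (pvWordGo_snd_length t [c.toUpper])

-- for-loop over the levels "12": first matching prefix gives (label, stripped name)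
def pvFindPre : List Char → List Char → List Char × List Char
  | [], s => ([], s)
  | lvl :: ls, s =>
    let pre := "Recognition_Practice/HSK_Level_".toList ++ [lvl, '/']
    if PySem.Chars.isIn pre s then
      ("HSK ".toList ++ [lvl] ++ ": ".toList, PySem.Chars.replace s pre [])
    else pvFindPre ls s

def display_set_name_alt (set_name : String) : String :=
  let p := pvFindPre "12".toList set_name.toList
  let s := PySem.Chars.replace p.2 "_flashcards".toList []
  String.ofList (p.1 ++ pvFmtGo s [])

-- ===== PRECONDITION & SPEC =====
def Spec_display_set_name (set_name : String) (out : String) : Prop := out = display_set_name_alt set_name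
instance (set_name : String) (out : String) : Decidable (Spec_display_set_name set_name out) := by unfold Spec_display_set_name; infer_instance

-- ===== CLAIM (what is proved, stated in full; the proofs are below) =====
def Claim_equal_display_set_name : Prop := ∀ (set_name : String), Dom_display_set_name set_name → Spec_display_set_name set_name (display_set_name set_name)

-- ===== LEMMAS AND PROOFS =====

-- '_' ↦ ' ' substitution, the character-level meaning of A's replace("_", " ")
def pvSub (c : Char) : Char := if c == '_' then ' ' else c

theorem pvIsspace_sub (c : Char) : PySem.Chars.isspace (pvSub c) = pvIsSep c := by
  by_cases h : c = '_'
  · subst h; decide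
  · simp [pvSub, pvIsSep, h]

theorem pvReplaceGo_underscore : ∀ (fuel : Nat) (l acc : List Char), l.length ≤ fuel →
    PySem.Chars.replace.go ['_'] [' '] fuel l acc = acc.reverse ++ l.map pvSub := by
  intro fuel
  induction fuel with
  | zero =>
    intro l acc h
    have : l = [] := List.eq_nil_of_length_eq_zero (Nat.le_zero.mp h)
    subst this; simp [PySem.Chars.replace.go]
  | succ n ih =>
    intro l acc h
    match l with
    | [] => simp [PySem.Chars.replace.go]
    | c :: t =>
      by_cases hc : c = '_'
      · subst hc
        rw [PySem.Chars.replace.go]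
        simp only [List.isPrefixOf, BEq.refl, Bool.true_and, if_true]
        simp only [List.length_cons, List.length_nil, List.drop_succ_cons, List.drop_zero,
          List.reverse_cons, List.reverse_nil, List.nil_append, List.singleton_append]
        rw [ih t (' ' :: acc) (by simpa using h)]
        simp [pvSub]
      · rw [PySem.Chars.replace.go]
        have : ['_'].isPrefixOf (c :: t) = false := by
          simp [List.isPrefixOf]; exact fun hh => absurd hh.symm hc
        rw [this]
        simp only [Bool.false_eq_true, if_false]
        rw [ih t (c :: acc) (by simpa using h)]
        simp [pvSub, hc]

theorem pvReplace_underscore (cs : List Char) :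
    PySem.Chars.replace cs ['_'] [' '] = cs.map pvSub := by
  simpa [PySem.Chars.replace] using pvReplaceGo_underscore cs.length cs [] le_rfl

-- split₀ characterization
theorem pvSplitGo_word : ∀ (t cur : List Char) (acc : List (List Char)), cur ≠ [] →
    PySem.Chars.split₀.go t cur acc =
      PySem.Chars.split₀.go (t.dropWhile (fun d => !PySem.Chars.isspace d)) []
        ((cur.reverse ++ t.takeWhile (fun d => !PySem.Chars.isspace d)) :: acc) := by
  intro t
  induction t with
  | nil => intro cur acc h; simp [PySem.Chars.split₀.go, h]
  | cons c r ih =>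
    intro cur acc h
    have hcur : cur.isEmpty = false := by simpa using h
    by_cases hs : PySem.Chars.isspace c = true
    · simp [PySem.Chars.split₀.go, hs, hcur]
    · simp only [Bool.not_eq_true] at hs
      simp [PySem.Chars.split₀.go, hs, ih _ _ (by simp : (c :: cur) ≠ [])]

theorem pvSplit_space (c : Char) (t : List Char) (h : PySem.Chars.isspace c = true) :
    PySem.Chars.split₀ (c :: t) = PySem.Chars.split₀ t := by
  simp [PySem.Chars.split₀, PySem.Chars.split₀.go, h]

theorem pvSplitGo_acc : ∀ (n : Nat) (s : List Char), s.length ≤ n → ∀ (acc : List (List Char)),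
    PySem.Chars.split₀.go s [] acc = acc.reverse ++ PySem.Chars.split₀ s := by
  intro n
  induction n with
  | zero =>
    intro s hs acc
    have : s = [] := List.eq_nil_of_length_eq_zero (Nat.le_zero.mp hs)
    subst this; simp [PySem.Chars.split₀, PySem.Chars.split₀.go]
  | succ n ih =>
    intro s hs acc
    match s with
    | [] => simp [PySem.Chars.split₀, PySem.Chars.split₀.go]
    | c :: t =>
      by_cases h : PySem.Chars.isspace c = true
      · have : PySem.Chars.split₀.go (c :: t) [] acc = PySem.Chars.split₀.go t [] acc := by
          simp [PySem.Chars.split₀.go, h]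
        rw [this, ih t (by simpa using hs) acc, pvSplit_space c t h]
      · simp only [Bool.not_eq_true] at h
        have step : ∀ (a : List (List Char)), PySem.Chars.split₀.go (c :: t) [] a =
            PySem.Chars.split₀.go (t.dropWhile (fun d => !PySem.Chars.isspace d)) []
              ((c :: t.takeWhile (fun d => !PySem.Chars.isspace d)) :: a) := by
          intro a
          have : PySem.Chars.split₀.go (c :: t) [] a = PySem.Chars.split₀.go t [c] a := by
            simp [PySem.Chars.split₀.go, h]
          rw [this, pvSplitGo_word t [c] a (by simp)]; simp
        rw [step acc]
        have hlen : (t.dropWhile (fun d => !PySem.Chars.isspace d)).length ≤ n := by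
          have := List.length_dropWhile_le (fun d => !PySem.Chars.isspace d) t
          simp at hs; omega
        rw [ih _ hlen, show PySem.Chars.split₀ (c :: t) = PySem.Chars.split₀.go (c :: t) [] [] from rfl,
          step [], ih _ hlen]
        simp

theorem pvSplit_word (c : Char) (t : List Char) (h : PySem.Chars.isspace c = false) :
    PySem.Chars.split₀ (c :: t) =
      (c :: t.takeWhile (fun d => !PySem.Chars.isspace d)) ::
        PySem.Chars.split₀ (t.dropWhile (fun d => !PySem.Chars.isspace d)) := by
  have : PySem.Chars.split₀ (c :: t) = PySem.Chars.split₀.go t [c] [] := by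
    simp [PySem.Chars.split₀, PySem.Chars.split₀.go, h]
  rw [this, pvSplitGo_word t [c] [] (by simp), pvSplitGo_acc (t.dropWhile _).length _ le_rfl]
  simp

theorem pvSplit_ne_nil : ∀ (n : Nat) (cs : List Char), cs.length ≤ n → ∀ w ∈ PySem.Chars.split₀ cs, w ≠ [] := by
  intro n
  induction n with
  | zero =>
    intro cs hcs w hw
    have : cs = [] := List.eq_nil_of_length_eq_zero (Nat.le_zero.mp hcs)
    subst this; simp [PySem.Chars.split₀, PySem.Chars.split₀.go] at hw
  | succ n ih =>
    intro cs hcs w hw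
    match cs with
    | [] => simp [PySem.Chars.split₀, PySem.Chars.split₀.go] at hw
    | c :: t =>
      by_cases h : PySem.Chars.isspace c = true
      · rw [pvSplit_space c t h] at hw
        exact ih t (by simpa using hcs) w hw
      · simp only [Bool.not_eq_true] at h
        rw [pvSplit_word c t h] at hw
        rcases List.mem_cons.mp hw with rfl | hw2
        · simp
        · have hlen : (t.dropWhile (fun d => !PySem.Chars.isspace d)).length ≤ n := by
            have := List.length_dropWhile_le (fun d => !PySem.Chars.isspace d) t
            simp at hcs; omega
          exact ih _ hlen w hw2

theorem pvWordGo_eq (t : List Char) : ∀ (w : List Char),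
    pvWordGo t w = (w ++ (t.takeWhile (fun d => !pvIsSep d)).map Char.toLower,
      t.dropWhile (fun d => !pvIsSep d)) := by
  induction t with
  | nil => intro w; simp [pvWordGo]
  | cons c r ih =>
    intro w
    by_cases h : pvIsSep c = true <;> simp [pvWordGo, h, List.takeWhile, List.dropWhile, ih]

-- the accumulator step of B's scan, as a fold over the word list
def pvJoinAcc (out : List Char) (ws : List (List Char)) : List Char :=
  ws.foldl (fun o w => if o.isEmpty then w else o ++ ' ' :: w) out

theorem pvMain : ∀ (n : Nat) (cs : List Char), cs.length ≤ n → ∀ (out : List Char),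
    pvFmtGo cs out = pvJoinAcc out ((PySem.Chars.split₀ (cs.map pvSub)).map pvCapL) := by
  intro n
  induction n with
  | zero =>
    intro cs hcs out
    have : cs = [] := List.eq_nil_of_length_eq_zero (Nat.le_zero.mp hcs)
    subst this; simp [pvFmtGo, PySem.Chars.split₀, PySem.Chars.split₀.go, pvJoinAcc]
  | succ n ih =>
    intro cs hcs out
    match cs with
    | [] => simp [pvFmtGo, PySem.Chars.split₀, PySem.Chars.split₀.go, pvJoinAcc]
    | c :: t =>
      by_cases h : pvIsSep c = true
      · rw [pvFmtGo]
        simp only [h, if_true]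
        rw [ih t (by simpa using hcs) out]
        have hsp : PySem.Chars.isspace (pvSub c) = true := by rw [pvIsspace_sub]; exact h
        simp only [List.map_cons]
        rw [pvSplit_space (pvSub c) (t.map pvSub) hsp]
      · rw [pvFmtGo]
        simp only [h, Bool.false_eq_true, if_false]
        rw [pvWordGo_eq]
        have hsp : PySem.Chars.isspace (pvSub c) = false := by rw [pvIsspace_sub]; exact eq_false_of_ne_true h
        have h' : pvIsSep c = false := eq_false_of_ne_true h
        have hc : pvSub c = c := by
          simp only [pvIsSep, Bool.or_eq_false_iff] at h'
          simp [pvSub, h'.1]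
        have hfun : ((fun d => !PySem.Chars.isspace d) ∘ pvSub) = (fun d => !pvIsSep d) := by
          funext d; simp [Function.comp, pvIsspace_sub]
        have htw : (t.map pvSub).takeWhile (fun d => !PySem.Chars.isspace d) =
            (t.takeWhile (fun d => !pvIsSep d)).map pvSub := by
          rw [List.takeWhile_map, hfun]
        have hdw : (t.map pvSub).dropWhile (fun d => !PySem.Chars.isspace d) =
            (t.dropWhile (fun d => !pvIsSep d)).map pvSub := by
          rw [List.dropWhile_map, hfun]
        have hid : (t.takeWhile (fun d => !pvIsSep d)).map pvSub = t.takeWhile (fun d => !pvIsSep d) := by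
          have : ∀ d ∈ t.takeWhile (fun d => !pvIsSep d), pvSub d = d := by
            intro d hd
            have := List.mem_takeWhile_imp hd
            simp only [pvIsSep, Bool.not_eq_eq_eq_not, Bool.not_true, Bool.or_eq_false_iff] at this
            simp [pvSub, this.1]
          simpa using List.map_congr_left this
        simp only [List.map_cons]
        rw [pvSplit_word (pvSub c) (t.map pvSub) hsp, htw, hdw, hid, hc]
        simp only [List.map_cons]
        have hlen : (t.dropWhile (fun d => !pvIsSep d)).length ≤ n := by
          have h1 := List.length_dropWhile_le (fun d => !pvIsSep d) t
          simp at hcs; omega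
        rw [ih _ hlen]
        simp only [pvJoinAcc, List.foldl_cons, pvCapL]
        rfl

theorem pvJoinAcc_ne (ws : List (List Char)) : ∀ (out : List Char), out ≠ [] →
    pvJoinAcc out ws = out ++ (ws.map (fun w => ' ' :: w)).flatten := by
  induction ws with
  | nil => intro out h; simp [pvJoinAcc]
  | cons w t ih =>
    intro out h
    simp only [pvJoinAcc, List.foldl_cons]
    rw [show (if out.isEmpty then w else out ++ ' ' :: w) = out ++ ' ' :: w by simp [h]]
    rw [show List.foldl (fun o w => if o.isEmpty then w else o ++ ' ' :: w) (out ++ ' ' :: w) t =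
      pvJoinAcc (out ++ ' ' :: w) t from rfl]
    rw [ih _ (by simp)]
    simp

theorem pvIntercalate_cons (ws : List (List Char)) : ∀ (w : List Char),
    List.intercalate [' '] (w :: ws) = w ++ (ws.map (fun x => ' ' :: x)).flatten := by
  induction ws with
  | nil => intro w; simp [List.intercalate]
  | cons b t ih => intro w; simp [List.intercalate, List.intersperse] at *; simp [ih]

theorem pvJoin_eq (ws : List (List Char)) (h : ∀ w ∈ ws, w ≠ []) :
    PySem.Chars.join [' '] ws = pvJoinAcc [] ws := by
  match ws with
  | [] => rfl
  | w :: t =>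
    have hw : w ≠ [] := h w (by simp)
    simp only [pvJoinAcc, List.foldl_cons, List.isEmpty_nil, if_true]
    rw [show PySem.Chars.join [' '] (w :: t) = List.intercalate [' '] (w :: t) from rfl]
    rw [pvIntercalate_cons, ← pvJoinAcc_ne t w hw]
    rfl

-- the formatting tail: A's pipeline equals B's scan
theorem pvTail (cs : List Char) :
    PySem.Chars.join [' '] ((PySem.Chars.split₀ (PySem.Chars.replace cs ['_'] [' '])).map pvCapL) =
      pvFmtGo cs [] := by
  rw [pvReplace_underscore, pvMain cs.length cs le_rfl []]
  apply pvJoin_eq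
  intro w hw
  simp only [List.mem_map] at hw
  obtain ⟨w0, hw0, rfl⟩ := hw
  have hne := pvSplit_ne_nil (cs.map pvSub).length _ le_rfl w0 hw0
  match w0, hne with
  | c :: r, _ => simp [pvCapL]

-- string-level corollary of pvTail, applied to A's clean-name string
theorem pvBranch (u : String) :
    (PySem.Str.join " " ((PySem.Str.split₀ (PySem.Str.replace u "_" " ")).map pyCapitalize)).toList =
      pvFmtGo u.toList [] := by
  rw [PySem.Str.toList_join, List.map_map,
    show (String.toList ∘ pyCapitalize) = (pvCapL ∘ String.toList) from by
      funext x; simp [pyCapitalize],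
    ← List.map_map,
    show (PySem.Str.split₀ (PySem.Str.replace u "_" " ")).map String.toList =
        PySem.Chars.split₀ (PySem.Chars.replace u.toList ['_'] [' ']) from by
      simp [PySem.Str.split₀_map_toList, PySem.Str.toList_replace]]
  exact pvTail u.toList

-- ===== VERDICT (by name: the statement is the Claim_ definition above) =====
theorem display_set_name_spec : Claim_equal_display_set_name := by
  intro s _
  show display_set_name s = display_set_name_alt s
  apply String.toList_inj.mp
  have e12 : "12".toList = ['1', '2'] := rfl
  have e1 : "Recognition_Practice/HSK_Level_".toList ++ ['1', '/'] = "Recognition_Practice/HSK_Level_1/".toList := by decide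
  have e2 : "Recognition_Practice/HSK_Level_".toList ++ ['2', '/'] = "Recognition_Practice/HSK_Level_2/".toList := by decide
  have l1 : "HSK ".toList ++ ['1'] ++ ": ".toList = "HSK 1: ".toList := by decide
  have l2 : "HSK ".toList ++ ['2'] ++ ": ".toList = "HSK 2: ".toList := by decide
  simp only [display_set_name, display_set_name_alt, e12, pvFindPre, e1, e2, l1, l2]
  by_cases h1 : PySem.Chars.isIn "Recognition_Practice/HSK_Level_1/".toList s.toList = true
  · have hA1 : PySem.Str.isIn "Recognition_Practice/HSK_Level_1/" s = true := by simpa using h1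
    simp only [h1, hA1, if_true, String.toList_append, String.toList_ofList]
    rw [pvBranch]
    simp [PySem.Str.toList_replace]
  · have hA1 : PySem.Str.isIn "Recognition_Practice/HSK_Level_1/" s = false := by
      simpa using eq_false_of_ne_true h1
    simp only [h1, hA1, Bool.false_eq_true, if_false]
    by_cases h2 : PySem.Chars.isIn "Recognition_Practice/HSK_Level_2/".toList s.toList = true
    · have hA2 : PySem.Str.isIn "Recognition_Practice/HSK_Level_2/" s = true := by simpa using h2
      simp only [h2, hA2, if_true, String.toList_append, String.toList_ofList]
      rw [pvBranch]
      simp [PySem.Str.toList_replace]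
    · have hA2 : PySem.Str.isIn "Recognition_Practice/HSK_Level_2/" s = false := by
        simpa using eq_false_of_ne_true h2
      simp only [h2, hA2, Bool.false_eq_true, if_false, String.toList_ofList]
      rw [pvBranch]
      simp [PySem.Str.toList_replace]
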